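-- pv_equiv track=rewrite | github.com/WindyITS/Business-model-KG | src/text2cypher/mlx/__init__.py | _balanced_json_candidates
-- ===== SOURCE A (Python) =====
-- def _balanced_json_candidates(text: str) -> list[str]:
--     candidates: list[str] = []
--     start_index: int | None = None
--     depth = 0
--     in_string = False
--     escape = False
--
--     for index, char in enumerate(text):
--         if escape:
--             escape = False
--             continue
--         if char == "\\" and in_string:
--             escape = True
--             continue
--         if char == '"':
--             in_string = not in_string
--             continue
--         if in_string:
--             continue
--         if char == "{":
--             if depth == 0:
--                 start_index = index
--             depth += 1
--         elif char == "}" and depth > 0: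
--             depth -= 1
--             if depth == 0 and start_index is not None:
--                 candidates.append(text[start_index : index + 1])
--                 start_index = None
--
--     return candidates
-- ===== SOURCE B (Python) =====
-- def _balanced_json_candidates(text: str) -> list[str]:
--     # Pass 1: collect the indices of braces that occur outside string literals.
--     braces: list[tuple[int, str]] = []
--     in_string = False
--     escape = False
--     for index, char in enumerate(text):
--         if escape:
--             escape = False
--         elif in_string:
--             if char == "\\":
--                 escape = True
--             elif char == '"':
--                 in_string = False
--         elif char == '"':
--             in_string = True
--         elif char == "{" or char == "}":
--             braces.append((index, char))
--     # Pass 2: match the structural braces with a depth counter.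
--     candidates: list[str] = []
--     depth = 0
--     start = 0
--     for index, char in braces:
--         if char == "{":
--             if depth == 0:
--                 start = index
--             depth += 1
--         elif depth > 0:
--             depth -= 1
--             if depth == 0:
--                 candidates.append(text[start : index + 1])
--     return candidates
-- ===== Notes on version B (the rewrite author's own statement) =====
-- stated objective: alternative
-- what changed: Splits A's single interleaved scan into two passes: a first pass that runs only the string/escape state machine and records the indices of structural braces, and a second pass that matches just those braces with a depth counter and slices the candidates.
import Mathlib
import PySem

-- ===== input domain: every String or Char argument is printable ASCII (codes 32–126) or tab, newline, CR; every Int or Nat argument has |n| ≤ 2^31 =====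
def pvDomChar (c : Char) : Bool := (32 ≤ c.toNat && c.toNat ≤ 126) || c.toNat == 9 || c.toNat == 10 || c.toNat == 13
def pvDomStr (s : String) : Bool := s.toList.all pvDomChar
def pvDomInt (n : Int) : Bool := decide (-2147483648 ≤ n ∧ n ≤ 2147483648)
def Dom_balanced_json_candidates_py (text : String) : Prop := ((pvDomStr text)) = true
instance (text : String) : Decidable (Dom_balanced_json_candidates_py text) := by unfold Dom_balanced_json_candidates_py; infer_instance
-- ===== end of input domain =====

-- B replaces A's single interleaved scan by two passes (brace-index collection, then depth matching); alternative decomposition, same cost.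

-- ===== PORT A =====
-- single loop over enumerate(text) carrying (candidates, start_index, depth, in_string, escape)
def balanced_json_candidates_py_aux (text : List Char) :
    List Char → Nat → List String → Option Nat → Nat → Bool → Bool → List String
  | [], _, cands, _, _, _, _ => cands
  | c :: rest, i, cands, start, depth, instr, esc =>
    if esc = true then
      balanced_json_candidates_py_aux text rest (i+1) cands start depth instr false
    else if c = '\\' ∧ instr = true then
      balanced_json_candidates_py_aux text rest (i+1) cands start depth instr true
    else if c = '"' then
      balanced_json_candidates_py_aux text rest (i+1) cands start depth (!instr) esc
    else if instr = true then
      balanced_json_candidates_py_aux text rest (i+1) cands start depth instr esc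
    else if c = '{' then
      balanced_json_candidates_py_aux text rest (i+1) cands
        (if depth = 0 then some i else start) (depth+1) instr esc
    else if c = '}' ∧ 0 < depth then
      if depth - 1 = 0 then
        match start with
        | some s =>
            balanced_json_candidates_py_aux text rest (i+1)
              (cands ++ [String.ofList (PySem.List.slice text (some (s:Int)) (some ((i:Int)+1)))])
              none (depth-1) instr esc
        | none => balanced_json_candidates_py_aux text rest (i+1) cands start (depth-1) instr esc
      else balanced_json_candidates_py_aux text rest (i+1) cands start (depth-1) instr esc
    else
      balanced_json_candidates_py_aux text rest (i+1) cands start depth instr esc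

def balanced_json_candidates_py (text : String) : List String :=
  balanced_json_candidates_py_aux text.toList text.toList 0 [] none 0 false false

-- ===== PORT B =====
-- pass 1: string/escape state machine only, emitting the structural braces with their indices
def altPass1 : List Char → Nat → Bool → Bool → List (Nat × Char)
  | [], _, _, _ => []
  | c :: rest, i, instr, esc =>
    if esc = true then altPass1 rest (i+1) instr false
    else if instr = true then
      if c = '\\' then altPass1 rest (i+1) instr true
      else if c = '"' then altPass1 rest (i+1) false esc
      else altPass1 rest (i+1) instr esc
    else if c = '"' then altPass1 rest (i+1) true esc
    else if c = '{' ∨ c = '}' then (i, c) :: altPass1 rest (i+1) instr esc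
    else altPass1 rest (i+1) instr esc

-- pass 2: match the recorded braces with a depth counter
def altPass2 (text : List Char) : List (Nat × Char) → List String → Nat → Nat → List String
  | [], cands, _, _ => cands
  | (i, c) :: rest, cands, depth, start =>
    if c = '{' then
      altPass2 text rest cands (depth+1) (if depth = 0 then i else start)
    else if 0 < depth then
      if depth - 1 = 0 then
        altPass2 text rest
          (cands ++ [String.ofList (PySem.List.slice text (some (start:Int)) (some ((i:Int)+1)))])
          (depth-1) start
      else altPass2 text rest cands (depth-1) start
    else altPass2 text rest cands depth start

def balanced_json_candidates_py_alt (text : String) : List String :=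
  altPass2 text.toList (altPass1 text.toList 0 false false) [] 0 0

-- ===== PRECONDITION & SPEC =====
def Spec_balanced_json_candidates_py (text : String) (out : List String) : Prop := out = balanced_json_candidates_py_alt text
instance (text : String) (out : List String) : Decidable (Spec_balanced_json_candidates_py text out) := by unfold Spec_balanced_json_candidates_py; infer_instance

-- ===== CLAIM (what is proved, stated in full; the proofs are below) =====
def Claim_equal_balanced_json_candidates_py : Prop := ∀ (text : String), Dom_balanced_json_candidates_py text → Spec_balanced_json_candidates_py text (balanced_json_candidates_py text)

-- ===== LEMMAS AND PROOFS =====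

-- Invariant: whenever depth > 0, A's optional start index is some of B's start index.
theorem pv_main (text : List Char) (cs : List Char) :
    ∀ (i : Nat) (cands : List String) (astart : Option Nat) (depth : Nat)
      (instr esc : Bool) (bstart : Nat),
      (0 < depth → astart = some bstart) →
      balanced_json_candidates_py_aux text cs i cands astart depth instr esc
        = altPass2 text (altPass1 cs i instr esc) cands depth bstart := by
  induction cs with
  | nil => intro i cands astart depth instr esc bstart _; rfl
  | cons c rest ih =>
    intro i cands astart depth instr esc bstart hinv
    by_cases hesc : esc = true
    · subst hesc
      simp [balanced_json_candidates_py_aux, altPass1]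
      exact ih _ _ _ _ _ _ _ hinv
    · simp only [Bool.not_eq_true] at hesc; subst hesc
      by_cases hinstr : instr = true
      · subst hinstr
        by_cases hbs : c = '\\'
        · simp [balanced_json_candidates_py_aux, altPass1, hbs]
          exact ih _ _ _ _ _ _ _ hinv
        · by_cases hq : c = '"'
          · simp [balanced_json_candidates_py_aux, altPass1, hq]
            exact ih _ _ _ _ _ _ _ hinv
          · simp [balanced_json_candidates_py_aux, altPass1, hbs, hq]
            exact ih _ _ _ _ _ _ _ hinv
      · simp only [Bool.not_eq_true] at hinstr; subst hinstr
        by_cases hq : c = '"'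
        · simp [balanced_json_candidates_py_aux, altPass1, hq]
          exact ih _ _ _ _ _ _ _ hinv
        · by_cases hob : c = '{'
          · subst hob
            by_cases hd : depth = 0
            · subst hd
              simp [balanced_json_candidates_py_aux, altPass1, altPass2, hq]
              exact ih _ _ _ _ _ _ _ (fun _ => rfl)
            · simp [balanced_json_candidates_py_aux, altPass1, altPass2, hq, hd]
              exact ih _ _ _ _ _ _ _ (fun _ => hinv (by omega))
          · by_cases hcb : c = '}'
            · subst hcb
              by_cases hd : 0 < depth
              · have hst := hinv hd
                subst hst
                by_cases hd1 : depth - 1 = 0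
                · simp [balanced_json_candidates_py_aux, altPass1, altPass2, hq, hob, hd, hd1]
                  exact ih _ _ _ _ _ _ _ (fun h => (Nat.lt_irrefl 0 (hd1 ▸ h)).elim)
                · simp [balanced_json_candidates_py_aux, altPass1, altPass2, hq, hob, hd, hd1]
                  exact ih _ _ _ _ _ _ _ (fun _ => rfl)
              · simp [balanced_json_candidates_py_aux, altPass1, altPass2, hq, hob, hd]
                exact ih _ _ _ _ _ _ _ hinv
            · simp [balanced_json_candidates_py_aux, altPass1, hq, hob, hcb]
              exact ih _ _ _ _ _ _ _ hinv

-- ===== VERDICT (by name: the statement is the Claim_ definition above) =====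
theorem balanced_json_candidates_py_spec : Claim_equal_balanced_json_candidates_py := by
  intro text _
  unfold Spec_balanced_json_candidates_py balanced_json_candidates_py balanced_json_candidates_py_alt
  exact pv_main text.toList text.toList 0 [] none 0 false false 0 (by omega)
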